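-- pv_equiv track=rewrite | github.com/malaysia-team-A/final_vc | app/api/chat.py | _select_building_image
-- ===== SOURCE A (Python) =====
-- from typing import Any, Dict, List, Optional
--
-- def _promote_drive_map_to_image(links: List[Dict[str, Any]]) -> Optional[Dict[str, Any]]:
--     for lnk in links or []:
--         if lnk.get("type") != "map":
--             continue
--         map_url = str(lnk.get("url") or "")
--         if "drive.google.com" in map_url.lower():
--             return {
--                 "url": map_url,
--                 "type": "building_image",
--                 "label": str(lnk.get("label") or "Campus Map"),
--             }
--     return None
--
-- def _select_building_image(
--     images: List[Dict[str, Any]],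
--     links: List[Dict[str, Any]],
--     user_msg: str,
--     search_term: str,
--     response_text: str,
-- ) -> Optional[Dict[str, Any]]:
--     img_list = list(images or [])
--     query_lower = f"{str(user_msg or '')} {str(search_term or '')}".lower()
--     response_lower = str(response_text or "").lower()
--
--     for img in img_list:
--         img_label = str(img.get("label") or "").lower()
--         if img_label and img_label in query_lower:
--             return img
--
--     for img in img_list:
--         img_label = str(img.get("label") or "").lower()
--         if img_label and img_label in response_lower:
--             return img
--
--     if img_list:
--         return img_list[0]
--
--     return _promote_drive_map_to_image(links or [])
-- ===== SOURCE B (Python) =====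
-- from typing import Any, Dict, List, Optional
--
--
-- def _select_building_image(
--     images: List[Dict[str, Any]],
--     links: List[Dict[str, Any]],
--     user_msg: str,
--     search_term: str,
--     response_text: str,
-- ) -> Optional[Dict[str, Any]]:
--     query_lower = f"{str(user_msg or '')} {str(search_term or '')}".lower()
--     response_lower = str(response_text or "").lower()
--
--     candidate = None
--     for img in images or []:
--         label = str(img.get("label") or "").lower()
--         if not label:
--             continue
--         if label in query_lower:
--             return img
--         if candidate is None and label in response_lower:
--             candidate = img
--
--     if candidate is not None:
--         return candidate
--     if images:
--         return images[0]
--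
--     for lnk in links or []:
--         if lnk.get("type") == "map":
--             url = str(lnk.get("url") or "")
--             if "drive.google.com" in url.lower():
--                 return {
--                     "url": url,
--                     "type": "building_image",
--                     "label": str(lnk.get("label") or "Campus Map"),
--                 }
--     return None
-- ===== Notes on version B (the rewrite author's own statement) =====
-- stated objective: simpler
-- what changed: Replaces A's two full scans over img_list (query pass, then response pass) plus a helper call with a single pass that returns a query match immediately and remembers only the first response match as a candidate, with the drive-map promotion inlined as the final fallback.
import Mathlib
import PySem

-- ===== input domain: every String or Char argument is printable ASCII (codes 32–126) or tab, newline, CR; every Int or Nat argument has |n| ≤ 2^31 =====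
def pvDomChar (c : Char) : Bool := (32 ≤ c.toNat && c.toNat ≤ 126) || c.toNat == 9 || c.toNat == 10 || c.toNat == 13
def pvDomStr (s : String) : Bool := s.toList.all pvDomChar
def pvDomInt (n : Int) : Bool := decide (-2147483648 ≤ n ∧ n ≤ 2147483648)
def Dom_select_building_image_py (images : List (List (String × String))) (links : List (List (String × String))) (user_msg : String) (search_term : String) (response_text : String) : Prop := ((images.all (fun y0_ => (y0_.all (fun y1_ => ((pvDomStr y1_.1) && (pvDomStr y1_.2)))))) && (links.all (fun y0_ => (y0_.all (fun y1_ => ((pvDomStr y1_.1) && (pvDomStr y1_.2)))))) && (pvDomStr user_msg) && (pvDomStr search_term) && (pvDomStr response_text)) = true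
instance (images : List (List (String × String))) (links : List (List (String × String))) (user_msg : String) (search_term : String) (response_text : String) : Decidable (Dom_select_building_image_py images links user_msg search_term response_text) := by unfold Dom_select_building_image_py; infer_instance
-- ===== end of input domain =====

-- B replaces A's two full scans over the image list with one pass keeping a first-response-match
-- candidate, and inlines the drive-map promotion fallback (objective: simpler; same return value).

-- ===== PORT A =====
-- img.get(k) — dict lookup (first match under the assoc-list convention)
def pvGet (img : List (String × String)) (k : String) : Option String :=
  (PySem.Dict.mk img).get? k

-- str(img.get("label") or "").lower()
def pvLabelLower (img : List (String × String)) : String :=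
  PySem.Str.lower ((pvGet img "label").getD "")

-- str(o or d): None or "" become d
def pvOrStr (o : Option String) (d : String) : String :=
  match o with
  | none => d
  | some s => if s = "" then d else s

-- _promote_drive_map_to_image: loop with continue, early return
def pvPromote : List (List (String × String)) → Option (List (String × String))
  | [] => none
  | lnk :: rest =>
    if (pvGet lnk "type").getD "" ≠ "map" then pvPromote rest
    else
      let map_url := (pvGet lnk "url").getD ""
      if PySem.Str.isIn "drive.google.com" (PySem.Str.lower map_url) then
        some [("url", map_url), ("type", "building_image"),
              ("label", pvOrStr (pvGet lnk "label") "Campus Map")]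
      else pvPromote rest

-- one of A's two identical for-loops over img_list: first img whose non-empty lowercased label
-- is contained in `text`
def pvFindLabelIn (text : String) : List (List (String × String)) → Option (List (String × String))
  | [] => none
  | img :: rest =>
    let l := pvLabelLower img
    if l ≠ "" ∧ PySem.Str.isIn l text then some img else pvFindLabelIn text rest

def select_building_image_py (images : List (List (String × String))) (links : List (List (String × String))) (user_msg : String) (search_term : String) (response_text : String) : Option (List (String × String)) :=
  let img_list := images
  let query_lower := PySem.Str.lower (user_msg ++ " " ++ search_term)
  let response_lower := PySem.Str.lower response_text
  match pvFindLabelIn query_lower img_list with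
  | some img => some img
  | none =>
    match pvFindLabelIn response_lower img_list with
    | some img => some img
    | none =>
      match img_list with
      | img0 :: _ => some img0
      | [] => pvPromote links

-- ===== PORT B =====
-- one pass: non-empty label in query → return img now; else first response match is remembered
-- as the candidate, returned when the scan ends
def pvAltScan (ql rl : String) (cand : Option (List (String × String))) : List (List (String × String)) → Option (List (String × String))
  | [] => cand
  | img :: rest =>
    let l := pvLabelLower img
    if l = "" then pvAltScan ql rl cand rest
    else if PySem.Str.isIn l ql then some img
    else if cand.isNone ∧ PySem.Str.isIn l rl then pvAltScan ql rl (some img) rest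
    else pvAltScan ql rl cand rest

-- B's inlined final fallback loop over links
def pvAltPromote : List (List (String × String)) → Option (List (String × String))
  | [] => none
  | lnk :: rest =>
    if (pvGet lnk "type").getD "" = "map" then
      let url := (pvGet lnk "url").getD ""
      if PySem.Str.isIn "drive.google.com" (PySem.Str.lower url) then
        some [("url", url), ("type", "building_image"),
              ("label", pvOrStr (pvGet lnk "label") "Campus Map")]
      else pvAltPromote rest
    else pvAltPromote rest

def select_building_image_py_alt (images : List (List (String × String))) (links : List (List (String × String))) (user_msg : String) (search_term : String) (response_text : String) : Option (List (String × String)) :=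
  let query_lower := PySem.Str.lower (user_msg ++ " " ++ search_term)
  let response_lower := PySem.Str.lower response_text
  match pvAltScan query_lower response_lower none images with
  | some img => some img
  | none =>
    match images with
    | img0 :: _ => some img0
    | [] => pvAltPromote links

-- ===== PRECONDITION & SPEC =====
def Spec_select_building_image_py (images : List (List (String × String))) (links : List (List (String × String))) (user_msg : String) (search_term : String) (response_text : String) (out : Option (List (String × String))) : Prop := out = select_building_image_py_alt images links user_msg search_term response_text
instance (images : List (List (String × String))) (links : List (List (String × String))) (user_msg : String) (search_term : String) (response_text : String) (out : Option (List (String × String))) : Decidable (Spec_select_building_image_py images links user_msg search_term response_text out) := by unfold Spec_select_building_image_py; infer_instance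

-- ===== CLAIM (what is proved, stated in full; the proofs are below) =====
def Claim_equal_select_building_image_py : Prop := ∀ (images : List (List (String × String))) (links : List (List (String × String))) (user_msg : String) (search_term : String) (response_text : String), Dom_select_building_image_py images links user_msg search_term response_text → Spec_select_building_image_py images links user_msg search_term response_text (select_building_image_py images links user_msg search_term response_text)

-- ===== LEMMAS AND PROOFS =====

-- the two promote loops agree
theorem pvPromote_eq (links : List (List (String × String))) :
    pvPromote links = pvAltPromote links := by
  induction links with
  | nil => rfl
  | cons lnk rest ih =>
    simp only [pvPromote, pvAltPromote]
    by_cases h : (pvGet lnk "type").getD "" = "map"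
    · simp [h, ih]
    · simp [h, ih]

-- the single pass equals: query scan, else the stored candidate, else the response scan
theorem pvAltScan_eq (ql rl : String) (cand : Option (List (String × String)))
    (imgs : List (List (String × String))) :
    pvAltScan ql rl cand imgs =
      match pvFindLabelIn ql imgs with
      | some i => some i
      | none =>
        match cand with
        | some c => some c
        | none => pvFindLabelIn rl imgs := by
  induction imgs generalizing cand with
  | nil => cases cand <;> rfl
  | cons img rest ih =>
    simp only [pvAltScan, pvFindLabelIn]
    by_cases hl : pvLabelLower img = ""
    · simp [hl, ih]
    · by_cases hq : PySem.Chars.isIn (pvLabelLower img).toList ql.toList = true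
      · simp [hl, hq]
      · by_cases hr : PySem.Chars.isIn (pvLabelLower img).toList rl.toList = true
        · cases cand with
          | none => simp [hl, hq, hr, ih]
          | some c => simp [hl, hq, hr, ih]
        · simp [hl, hq, hr, ih]

-- ===== VERDICT (by name: the statement is the Claim_ definition above) =====
theorem select_building_image_py_spec : Claim_equal_select_building_image_py := by
  intro images links user_msg search_term response_text _
  unfold Spec_select_building_image_py select_building_image_py select_building_image_py_alt
  simp only [pvAltScan_eq, pvPromote_eq]
  cases pvFindLabelIn (PySem.Str.lower (user_msg ++ " " ++ search_term)) images <;>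
    cases pvFindLabelIn (PySem.Str.lower response_text) images <;>
      cases images <;> rfl
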